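-- pv_equiv track=rewrite | github.com/jin-ryu/Algorithm-Team-Notes | CodingTest/2020NaverMainPlatformBackend/1.py | solution
-- ===== SOURCE A (Python) =====
-- def solution(A):
--     N = len(A)
--
--     # 부분 리스트 생성
--     subs = []
--     for i in range(N):
--         for j in range(i+1, N+1):
--             subs.append(A[i:j])
--
--     # 등차수열인지 확인
--     count = 0
--     for sub in subs:
--         if len(sub) < 3:
--             continue
--         v = sub[1] - sub[0]
--         for i in range(len(sub)-1):
--             if v != sub[i+1] - sub[i]:
--                 break
--         else:
--             count += 1
--
--     return count
-- ===== SOURCE B (Python) =====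
-- def solution(A):
--     count = 0
--     run = 0
--     for k in range(2, len(A)):
--         if A[k] - A[k - 1] == A[k - 1] - A[k - 2]:
--             run += 1
--         else:
--             run = 0
--         count += run
--     return count
-- ===== Notes on version B (the rewrite author's own statement) =====
-- stated objective: faster
-- what changed: B drops A's materialisation of all O(N^2) subarrays and per-subarray AP re-check, and instead does a single pass over consecutive differences, accumulating the length of the current run of equal differences (the number of AP subarrays of length >= 3 ending at each index) into the total.
import Mathlib
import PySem

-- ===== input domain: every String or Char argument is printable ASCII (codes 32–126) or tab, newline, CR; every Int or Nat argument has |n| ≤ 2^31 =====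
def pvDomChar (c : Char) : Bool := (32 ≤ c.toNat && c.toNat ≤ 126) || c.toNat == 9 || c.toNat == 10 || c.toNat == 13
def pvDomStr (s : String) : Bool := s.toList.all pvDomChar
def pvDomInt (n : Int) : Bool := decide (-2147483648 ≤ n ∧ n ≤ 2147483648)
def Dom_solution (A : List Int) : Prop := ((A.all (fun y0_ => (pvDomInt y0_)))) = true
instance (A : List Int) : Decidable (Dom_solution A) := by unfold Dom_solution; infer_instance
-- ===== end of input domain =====

-- B replaces A's materialise-all-subarrays-then-test O(N^3) scan by a single pass over
-- consecutive differences that accumulates runs of equal differences (objective: faster).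

-- ===== PORT A =====
def solution (A : List Int) : Int :=
  let N : Int := A.length
  let subs : List (List Int) :=
    (PySem.List.pyRange 0 N 1).foldl (fun acc i =>
      (PySem.List.pyRange (i + 1) (N + 1) 1).foldl (fun acc2 j =>
        acc2 ++ [PySem.List.slice A (some i) (some j)]) acc) []
  subs.foldl (fun count sub =>
    if sub.length < 3 then count
    else
      let v := PySem.List.pyGetD sub 1 0 - PySem.List.pyGetD sub 0 0
      let ok := (PySem.List.pyRange 0 ((sub.length : Int) - 1) 1).foldl
        (fun ok i =>
          if v ≠ PySem.List.pyGetD sub (i + 1) 0 - PySem.List.pyGetD sub i 0 then false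
          else ok) true
      if ok then count + 1 else count) 0

-- ===== PORT B =====
def solution_alt (A : List Int) : Int :=
  ((PySem.List.pyRange 2 (A.length : Int) 1).foldl
    (fun (st : Int × Int) k =>
      let run : Int :=
        if PySem.List.pyGetD A k 0 - PySem.List.pyGetD A (k - 1) 0 =
            PySem.List.pyGetD A (k - 1) 0 - PySem.List.pyGetD A (k - 2) 0
        then st.2 + 1 else 0
      (st.1 + run, run)) ((0 : Int), (0 : Int))).1

-- ===== PRECONDITION & SPEC =====
def Spec_solution (A : List Int) (out : Int) : Prop := out = solution_alt A
instance (A : List Int) (out : Int) : Decidable (Spec_solution A out) := by unfold Spec_solution; infer_instance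

-- ===== CLAIM (what is proved, stated in full; the proofs are below) =====
def Claim_equal_solution : Prop := ∀ (A : List Int), Dom_solution A → Spec_solution A (solution A)

-- ===== LEMMAS AND PROOFS =====

-- difference of consecutive elements, and 'A[i:j] is an AP subarray of length ≥ 3'
def pvD (A : List Int) (t : Nat) : Int := A.getD (t + 1) 0 - A.getD t 0

def pvQ (A : List Int) (i j : Nat) : Bool :=
  decide (i + 3 ≤ j) && decide (∀ m < j, i + m + 1 < j → pvD A (i + m) = pvD A i)

def pvCnt (A : List Int) (k : Nat) : Nat := (List.range k).countP (fun i => pvQ A i k)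

-- the Bool A's per-sub test computes
def pvPb (sub : List Int) : Bool :=
  !(decide (sub.length < 3)) &&
  ((PySem.List.pyRange 0 ((sub.length : Int) - 1) 1).foldl
    (fun ok i =>
      if (PySem.List.pyGetD sub 1 0 - PySem.List.pyGetD sub 0 0) ≠
          PySem.List.pyGetD sub (i + 1) 0 - PySem.List.pyGetD sub i 0 then false
      else ok) true)

lemma pv_inner_fold (g : Int → Int) (v : Int) :
    ∀ (l : List Int) (b : Bool),
      l.foldl (fun ok i => if v ≠ g i then false else ok) b
        = (b && l.all (fun i => decide (g i = v))) := by
  intro l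
  induction l with
  | nil => intro b; simp
  | cons a t ih =>
    intro b
    by_cases h : v = g a
    · have hb : (if v ≠ g a then false else b) = b := by simp [h]
      rw [List.foldl_cons, hb, ih]
      simp [h]
    · have hb : (if v ≠ g a then false else b) = false := by simp [h]
      have hd : decide (g a = v) = false := by
        simp only [decide_eq_false_iff_not]
        exact fun hh => h hh.symm
      rw [List.foldl_cons, hb, ih]
      simp [hd]

lemma pv_count_fold (subs : List (List Int)) (c : Int) :
      subs.foldl (fun count sub =>
        if sub.length < 3 then count
        else
          let v := PySem.List.pyGetD sub 1 0 - PySem.List.pyGetD sub 0 0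
          let ok := (PySem.List.pyRange 0 ((sub.length : Int) - 1) 1).foldl
            (fun ok i =>
              if v ≠ PySem.List.pyGetD sub (i + 1) 0 - PySem.List.pyGetD sub i 0 then false
              else ok) true
          if ok then count + 1 else count) c
      = c + (subs.countP pvPb : Int) := by
  have hf : (fun (count : Int) (sub : List Int) =>
        if sub.length < 3 then count
        else
          let v := PySem.List.pyGetD sub 1 0 - PySem.List.pyGetD sub 0 0
          let ok := (PySem.List.pyRange 0 ((sub.length : Int) - 1) 1).foldl
            (fun ok i =>
              if v ≠ PySem.List.pyGetD sub (i + 1) 0 - PySem.List.pyGetD sub i 0 then false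
              else ok) true
          if ok then count + 1 else count)
      = fun count sub => if pvPb sub then count + 1 else count := by
    funext c s
    by_cases h3 : s.length < 3
    · simp [pvPb, h3]
    · by_cases hok : (PySem.List.pyRange 0 ((s.length : Int) - 1) 1).foldl
          (fun ok i =>
            if (PySem.List.pyGetD s 1 0 - PySem.List.pyGetD s 0 0) ≠
                PySem.List.pyGetD s (i + 1) 0 - PySem.List.pyGetD s i 0 then false
            else ok) true = true
      · simp [pvPb, h3, hok]
      · simp [pvPb, h3, hok]
  rw [hf]
  exact PySem.List.foldl_if_add_one pvPb subs c

-- A's per-sub test on the slice A[i:j] is pvQ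
lemma pv_Pb_slice (A : List Int) (i j : Nat) (hij : i < j) (hj : j ≤ A.length) :
    pvPb (PySem.List.slice A (some (i : Int)) (some (j : Int))) = pvQ A i j := by
  rw [PySem.List.slice_natCast]
  set sub := (A.drop i).take (j - i) with hsubdef
  have hlen : sub.length = j - i := by
    simp [hsubdef]
    omega
  have hget : ∀ m, m < j - i → sub.getD m 0 = A.getD (i + m) 0 := by
    intro m hm
    rw [List.getD_eq_getElem?_getD, List.getD_eq_getElem?_getD, hsubdef]
    rw [List.getElem?_take, if_pos hm, List.getElem?_drop]
  by_cases h3 : j - i < 3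
  · have h1 : pvPb sub = false := by
      simp [pvPb, hlen, h3]
    have h2 : pvQ A i j = false := by
      simp only [pvQ, Bool.and_eq_false_iff, decide_eq_false_iff_not]
      left
      omega
    rw [h1, h2]
  · have hcast1 : ∀ m : Nat, ((m : Int) + 1) = ((m + 1 : Nat) : Int) := by
      intro m; push_cast; ring
    have hgd : ∀ m : Nat, m + 1 < j - i →
        PySem.List.pyGetD sub ((m : Int) + 1) 0 - PySem.List.pyGetD sub (m : Int) 0
          = pvD A (i + m) := by
      intro m hm
      rw [hcast1, PySem.List.pyGetD_natCast, PySem.List.pyGetD_natCast,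
        hget (m + 1) (by omega), hget m (by omega), pvD]
      have : i + (m + 1) = i + m + 1 := by omega
      rw [this]
    have hv : PySem.List.pyGetD sub 1 0 - PySem.List.pyGetD sub 0 0 = pvD A i := by
      have e1 : (1 : Int) = ((1 : Nat) : Int) := by norm_num
      have e0 : (0 : Int) = ((0 : Nat) : Int) := by norm_num
      rw [e1, PySem.List.pyGetD_natCast, PySem.List.pyGetD_zero,
        hget 1 (by omega), hget 0 (by omega), pvD]
      simp
    unfold pvPb
    rw [pv_inner_fold
      (fun ii => PySem.List.pyGetD sub (ii + 1) 0 - PySem.List.pyGetD sub ii 0)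
      (PySem.List.pyGetD sub 1 0 - PySem.List.pyGetD sub 0 0)]
    have hcast2 : ((sub.length : Int) - 1) = ((j - i - 1 : Nat) : Int) := by
      rw [hlen]; omega
    rw [hcast2, PySem.List.pyRange_zero_natCast, List.all_map]
    rw [Bool.eq_iff_iff]
    simp only [Bool.and_eq_true, Bool.not_eq_true', decide_eq_false_iff_not,
      List.all_eq_true, List.mem_range, decide_eq_true_eq, Function.comp, pvQ, hlen]
    constructor
    · rintro ⟨-, -, h⟩
      refine ⟨by omega, ?_⟩
      intro m _ hm2
      have hh := h m (by omega)
      rw [hgd m (by omega), hv] at hh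
      exact hh
    · intro h
      refine ⟨by omega, trivial, ?_⟩
      intro m hm
      rw [hgd m (by omega), hv]
      exact h.2 m (by omega) (by omega)

-- cnt recurrence
lemma pv_cnt_succ (A : List Int) (k : Nat) (hk : 2 ≤ k) :
    pvCnt A (k + 1) = if pvD A (k - 1) = pvD A (k - 2) then pvCnt A k + 1 else 0 := by
  by_cases h : pvD A (k - 1) = pvD A (k - 2)
  · rw [if_pos h]
    obtain ⟨b, rfl⟩ : ∃ b, k = b + 2 := ⟨k - 2, by omega⟩
    have h' : pvD A (b + 1) = pvD A b := by
      have e1 : b + 2 - 1 = b + 1 := by omega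
      have e2 : b + 2 - 2 = b := by omega
      rw [e1, e2] at h
      exact h
    unfold pvCnt
    have e1 : List.range (b + 2 + 1) = List.range b ++ [b, b + 1, b + 2] := by
      rw [List.range_succ, List.range_succ, List.range_succ]
      simp
    have e2 : List.range (b + 2) = List.range b ++ [b, b + 1] := by
      rw [List.range_succ, List.range_succ]
      simp
    rw [e1, e2, List.countP_append, List.countP_append]
    have congb : (List.range b).countP (fun i => pvQ A i (b + 2 + 1))
        = (List.range b).countP (fun i => pvQ A i (b + 2)) := by
      apply List.countP_congr
      intro x hx
      simp only [List.mem_range] at hx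
      simp only [pvQ, Bool.and_eq_true, decide_eq_true_eq]
      constructor
      · rintro ⟨h1, h2⟩
        exact ⟨by omega, fun m hm hm2 => h2 m (by omega) (by omega)⟩
      · rintro ⟨h1, h2⟩
        refine ⟨by omega, ?_⟩
        intro m hm hm2
        by_cases hcase : x + m + 1 < b + 2
        · exact h2 m (by omega) hcase
        · have hxm : x + m = b + 1 := by omega
          have hb : pvD A b = pvD A x := by
            have hh := h2 (b - x) (by omega) (by omega)
            have e : x + (b - x) = b := by omega
            rw [e] at hh
            exact hh
          calc pvD A (x + m) = pvD A (b + 1) := by rw [hxm]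
            _ = pvD A b := h'
            _ = pvD A x := hb
    have q1 : pvQ A b (b + 2 + 1) = true := by
      simp only [pvQ, Bool.and_eq_true, decide_eq_true_eq]
      refine ⟨by omega, ?_⟩
      intro m hm hm2
      have hm' : m = 0 ∨ m = 1 := by omega
      rcases hm' with rfl | rfl
      · simp
      · simpa using h'
    have q2 : pvQ A (b + 1) (b + 2 + 1) = false := by
      simp only [pvQ, Bool.and_eq_false_iff, decide_eq_false_iff_not]
      left
      omega
    have q3 : pvQ A (b + 2) (b + 2 + 1) = false := by
      simp only [pvQ, Bool.and_eq_false_iff, decide_eq_false_iff_not]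
      left
      omega
    have q4 : pvQ A b (b + 2) = false := by
      simp only [pvQ, Bool.and_eq_false_iff, decide_eq_false_iff_not]
      left
      omega
    have q5 : pvQ A (b + 1) (b + 2) = false := by
      simp only [pvQ, Bool.and_eq_false_iff, decide_eq_false_iff_not]
      left
      omega
    rw [congb]
    simp [q1, q2, q3, q4, q5]
  · rw [if_neg h]
    apply List.countP_eq_zero.2
    intro x hx
    simp only [List.mem_range] at hx
    simp only [pvQ, Bool.and_eq_true, decide_eq_true_eq, not_and]
    intro h1 hall
    have d1 : pvD A (k - 1) = pvD A x := by
      have hh := hall (k - 1 - x) (by omega) (by omega)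
      have e : x + (k - 1 - x) = k - 1 := by omega
      rw [e] at hh
      exact hh
    have d2 : pvD A (k - 2) = pvD A x := by
      by_cases hx2 : x = k - 2
      · rw [hx2]
      · have hh := hall (k - 2 - x) (by omega) (by omega)
        have e : x + (k - 2 - x) = k - 2 := by omega
        rw [e] at hh
        exact hh
    exact h (d1.trans d2.symm)

lemma pv_cnt_small (A : List Int) (k : Nat) (hk : k ≤ 2) : pvCnt A k = 0 := by
  apply List.countP_eq_zero.2
  intro a _
  simp [pvQ]
  omega

-- B's fold invariant
lemma pv_alt_fold (A : List Int) :
    ∀ (m : Nat), 2 ≤ m →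
      (PySem.List.pyRange 2 (m : Int) 1).foldl
        (fun (st : Int × Int) k =>
          let run : Int :=
            if PySem.List.pyGetD A k 0 - PySem.List.pyGetD A (k - 1) 0 =
                PySem.List.pyGetD A (k - 1) 0 - PySem.List.pyGetD A (k - 2) 0
            then st.2 + 1 else 0
          (st.1 + run, run)) ((0 : Int), (0 : Int))
      = (((((List.range (m + 1)).map (pvCnt A)).sum : Nat) : Int), ((pvCnt A m : Nat) : Int)) := by
  intro m hm
  induction m, hm using Nat.le_induction with
  | base =>
    rw [show ((2 : Nat) : Int) = 2 by norm_num, PySem.List.pyRange_one_eq_nil (by norm_num)]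
    simp [List.range_succ, pv_cnt_small A 0 (by omega), pv_cnt_small A 1 (by omega),
      pv_cnt_small A 2 (by omega)]
  | succ m hm ih =>
    have hcast : ((m + 1 : Nat) : Int) = (m : Int) + 1 := by push_cast; ring
    rw [hcast, PySem.List.pyRange_one_succ_right (by exact_mod_cast hm), List.foldl_append, ih]
    simp only [List.foldl_cons, List.foldl_nil]
    have em1 : ((m : Int) - 1) = ((m - 1 : Nat) : Int) := by omega
    have em2 : ((m : Int) - 2) = ((m - 2 : Nat) : Int) := by omega
    simp only [em1, em2, PySem.List.pyGetD_natCast]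
    have e1 : A.getD m 0 - A.getD (m - 1) 0 = pvD A (m - 1) := by
      unfold pvD
      have : m - 1 + 1 = m := by omega
      rw [this]
    have e2 : A.getD (m - 1) 0 - A.getD (m - 2) 0 = pvD A (m - 2) := by
      unfold pvD
      have : m - 2 + 1 = m - 1 := by omega
      rw [this]
    simp only [e1, e2]
    have hsum : ((List.range (m + 1 + 1)).map (pvCnt A)).sum
        = ((List.range (m + 1)).map (pvCnt A)).sum + pvCnt A (m + 1) := by
      rw [List.range_succ]
      simp
    rw [hsum, pv_cnt_succ A m hm]
    by_cases hd : pvD A (m - 1) = pvD A (m - 2)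
    · simp only [if_pos hd]
      push_cast
      constructor
    · simp only [if_neg hd]
      push_cast
      constructor

lemma pv_solution_alt (A : List Int) :
    solution_alt A = (((List.range (A.length + 1)).map (pvCnt A)).sum : Nat) := by
  unfold solution_alt
  by_cases h2 : 2 ≤ A.length
  · rw [pv_alt_fold A A.length h2]
  · rw [PySem.List.pyRange_one_eq_nil (by exact_mod_cast by omega : (A.length : Int) ≤ 2)]
    have hz : ((List.range (A.length + 1)).map (pvCnt A)).sum = 0 := by
      apply List.sum_eq_zero
      intro x hx
      simp only [List.mem_map, List.mem_range] at hx
      obtain ⟨k, hk, rfl⟩ := hx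
      exact pv_cnt_small A k (by omega)
    rw [List.foldl_nil, hz]
    simp

lemma pv_solution_A (A : List Int) :
    solution A
      = (((List.range A.length).map (fun i =>
          (List.range (A.length - i)).countP (fun k => pvQ A i (i + 1 + k)))).sum : Nat) := by
  show ((PySem.List.pyRange 0 (A.length : Int) 1).foldl (fun acc i =>
      (PySem.List.pyRange (i + 1) ((A.length : Int) + 1) 1).foldl (fun acc2 j =>
        acc2 ++ [PySem.List.slice A (some i) (some j)]) acc) []).foldl
    (fun count sub =>
      if sub.length < 3 then count
      else
        let v := PySem.List.pyGetD sub 1 0 - PySem.List.pyGetD sub 0 0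
        let ok := (PySem.List.pyRange 0 ((sub.length : Int) - 1) 1).foldl
          (fun ok i =>
            if v ≠ PySem.List.pyGetD sub (i + 1) 0 - PySem.List.pyGetD sub i 0 then false
            else ok) true
        if ok then count + 1 else count) 0 = _
  rw [pv_count_fold]
  have hfun : (fun (acc : List (List Int)) (i : Int) =>
      (PySem.List.pyRange (i + 1) ((A.length : Int) + 1) 1).foldl (fun acc2 j =>
        acc2 ++ [PySem.List.slice A (some i) (some j)]) acc)
      = fun acc i => acc ++ (PySem.List.pyRange (i + 1) ((A.length : Int) + 1) 1).map
          (fun j => PySem.List.slice A (some i) (some j)) := by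
    funext acc i
    rw [PySem.List.foldl_append_singleton_eq_map]
  rw [hfun, PySem.List.foldl_append_eq_flatMap, List.nil_append,
    PySem.List.pyRange_zero_natCast, List.flatMap_map, List.countP_flatMap]
  have hmap : (List.range A.length).map
        (List.countP pvPb ∘ fun a : Nat => (PySem.List.pyRange ((a : Int) + 1) ((A.length : Int) + 1) 1).map
          (fun j => PySem.List.slice A (some (a : Int)) (some j)))
      = (List.range A.length).map (fun i =>
          (List.range (A.length - i)).countP (fun k => pvQ A i (i + 1 + k))) := by
    apply List.map_congr_left
    intro i hi
    simp only [List.mem_range] at hi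
    simp only [Function.comp]
    rw [List.countP_map, PySem.List.pyRange_one]
    have ht : (((A.length : Int) + 1) - ((i : Int) + 1)).toNat = A.length - i := by omega
    rw [ht, List.countP_map]
    apply List.countP_congr
    intro k hk
    simp only [List.mem_range] at hk
    simp only [Function.comp]
    have hc : ((i : Int) + 1 + (k : Int)) = ((i + 1 + k : Nat) : Int) := by push_cast; ring
    rw [hc, pv_Pb_slice A i (i + 1 + k) (by omega) (by omega)]
  rw [hmap]
  omega

-- countP over an initial range extends to range (n+1) when the predicate forces j > i
lemma pv_countP_range_ext_right (A : List Int) (i n : Nat) (hin : i ≤ n) :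
    (List.range (n - i)).countP (fun k => pvQ A i (i + 1 + k))
      = (List.range (n + 1)).countP (fun j => pvQ A i j) := by
  have e : n + 1 = (i + 1) + (n - i) := by omega
  rw [e, List.range_add, List.countP_append, List.countP_map]
  have h0 : (List.range (i + 1)).countP (fun j => pvQ A i j) = 0 := by
    apply List.countP_eq_zero.2
    intro x hx
    simp only [List.mem_range] at hx
    simp only [pvQ, Bool.and_eq_true, decide_eq_true_eq, not_and]
    intro h1
    omega
  rw [h0]
  simp only [Function.comp_def]
  omega

lemma pv_cnt_ext (A : List Int) (k n : Nat) (hk : k ≤ n) :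
    pvCnt A k = (List.range (n + 1)).countP (fun i => pvQ A i k) := by
  unfold pvCnt
  have e : n + 1 = k + (n + 1 - k) := by omega
  rw [e, List.range_add, List.countP_append, List.countP_map]
  have h0 : (List.range (n + 1 - k)).countP ((fun i => pvQ A i k) ∘ fun x => k + x) = 0 := by
    apply List.countP_eq_zero.2
    intro x hx
    simp only [Function.comp, pvQ, Bool.and_eq_true, decide_eq_true_eq, not_and]
    intro h1
    omega
  rw [h0]
  omega

lemma pv_list_sum_range (f : Nat → Nat) :
    ∀ (M : Nat), ((List.range M).map f).sum = ∑ x ∈ Finset.range M, f x := by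
  intro M
  induction M with
  | zero => simp
  | succ m ih => simp [List.range_succ, ih, Finset.sum_range_succ]

lemma pv_countP_range_sum (p : Nat → Bool) :
    ∀ (M : Nat), (List.range M).countP p = ∑ x ∈ Finset.range M, (if p x then 1 else 0) := by
  intro M
  induction M with
  | zero => simp
  | succ m ih =>
    rw [List.range_succ, List.countP_append, ih, Finset.sum_range_succ]
    simp [List.countP_cons]

-- ===== VERDICT (by name: the statement is the Claim_ definition above) =====
theorem solution_spec : Claim_equal_solution := by
  intro A _
  unfold Spec_solution
  rw [pv_solution_A, pv_solution_alt]
  congr 1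
  have hL : (List.range A.length).map (fun i =>
        (List.range (A.length - i)).countP (fun k => pvQ A i (i + 1 + k)))
      = (List.range A.length).map (fun i =>
        (List.range (A.length + 1)).countP (fun j => pvQ A i j)) := by
    apply List.map_congr_left
    intro i hi
    simp only [List.mem_range] at hi
    exact pv_countP_range_ext_right A i A.length (by omega)
  rw [hL]
  have hextra : (List.range (A.length + 1)).countP (fun j => pvQ A A.length j) = 0 := by
    apply List.countP_eq_zero.2
    intro x hx
    simp only [List.mem_range] at hx
    simp only [pvQ, Bool.and_eq_true, decide_eq_true_eq, not_and]
    intro h1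
    omega
  have hL2 : ∀ (C : Nat → Nat), C A.length = 0 →
      ((List.range A.length).map C).sum = ((List.range (A.length + 1)).map C).sum := by
    intro C hC
    rw [List.range_succ, List.map_append, List.sum_append]
    simp [hC]
  rw [hL2 (fun i => (List.range (A.length + 1)).countP (fun j => pvQ A i j)) hextra]
  have hR : (List.range (A.length + 1)).map (pvCnt A)
      = (List.range (A.length + 1)).map (fun k =>
        (List.range (A.length + 1)).countP (fun i => pvQ A i k)) := by
    apply List.map_congr_left
    intro k hk
    simp only [List.mem_range] at hk
    exact pv_cnt_ext A k A.length (by omega)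
  rw [hR]
  rw [pv_list_sum_range, pv_list_sum_range]
  simp only [pv_countP_range_sum]
  exact Finset.sum_comm
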